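-- pv_equiv track=rewrite | github.com/data4society/mpro-rp | mprorp/tomita/OVD/global_identification.py | cut_kladr
-- ===== SOURCE A (Python) =====
-- def cut_kladr(code):
--     if len(code) > 12:
--         r1 = code[0:3]
--         r2 = code[3:6]
--         c = code[6:9]
--         p = code[9:13]
--         other = code[13:]
--     else:
--         r1 = code[0:3]
--         r2 = code[3:6]
--         c = code[6:9]
--         p = code[9:len(code)]
--         other = ''
--     parts = ((r1,r1+r2+c+p+other), (r2,r2+c+p+other), (c,c+p+other), (p,p+other), (other,other))
--     kladr = ''
--     for part in parts:
--         if part[1].count('0') != len(part[1]):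
--             kladr += part[0]
--         else:
--             return kladr
--     return kladr
-- ===== SOURCE B (Python) =====
-- def cut_kladr(code):
--     if len(code) > 12:
--         pieces = [code[0:3], code[3:6], code[6:9], code[9:13], code[13:]]
--     else:
--         pieces = [code[0:3], code[3:6], code[6:9], code[9:], '']
--     kept = list(reversed(pieces))
--     while kept and all(ch == '0' for ch in kept[0]):
--         kept = kept[1:]
--     return ''.join(reversed(kept))
-- ===== Notes on version B (the rewrite author's own statement) =====
-- stated objective: simpler
-- what changed: Instead of building the five cumulative suffix strings and scanning forward with a zero-count test on each, B splits the code into the five pieces once, drops trailing zero-only pieces from the end, and joins what remains.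
import Mathlib
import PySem

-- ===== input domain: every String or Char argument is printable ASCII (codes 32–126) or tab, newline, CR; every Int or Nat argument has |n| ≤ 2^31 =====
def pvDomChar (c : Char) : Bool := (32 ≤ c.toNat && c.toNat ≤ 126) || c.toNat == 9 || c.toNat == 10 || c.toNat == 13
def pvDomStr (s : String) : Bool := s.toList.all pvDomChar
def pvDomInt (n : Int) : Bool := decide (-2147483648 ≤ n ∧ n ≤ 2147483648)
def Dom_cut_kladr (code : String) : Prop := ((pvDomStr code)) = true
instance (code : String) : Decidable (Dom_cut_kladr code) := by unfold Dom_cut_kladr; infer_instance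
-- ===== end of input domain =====

-- B replaces A's forward scan over cumulative suffix strings by splitting into the five
-- pieces once and dropping trailing all-zero pieces (objective: simpler).


-- ===== PORT A =====
-- the for-loop over `parts` with its early `return kladr`
def akLoop : List (List Char × List Char) → List Char → List Char
  | [], kladr => kladr
  | part :: rest, kladr =>
      if PySem.Chars.count part.2 ['0'] ≠ part.2.length then akLoop rest (kladr ++ part.1)
      else kladr

def cut_kladr (code : String) : String :=
  let cs := code.toList
  let r1 := PySem.List.slice cs (some 0) (some 3)
  let r2 := PySem.List.slice cs (some 3) (some 6)
  let c  := PySem.List.slice cs (some 6) (some 9)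
  let p  := if cs.length > 12 then PySem.List.slice cs (some 9) (some 13)
            else PySem.List.slice cs (some 9) (some (cs.length : Int))
  let other := if cs.length > 12 then PySem.List.slice cs (some 13) none else []
  let parts := [(r1, r1++r2++c++p++other), (r2, r2++c++p++other), (c, c++p++other),
                (p, p++other), (other, other)]
  String.ofList (akLoop parts [])

-- ===== PORT B =====
def cut_kladr_alt (code : String) : String :=
  let cs := code.toList
  let pieces :=
    if cs.length > 12 then
      [PySem.List.slice cs (some 0) (some 3), PySem.List.slice cs (some 3) (some 6),
       PySem.List.slice cs (some 6) (some 9), PySem.List.slice cs (some 9) (some 13),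
       PySem.List.slice cs (some 13) none]
    else
      [PySem.List.slice cs (some 0) (some 3), PySem.List.slice cs (some 3) (some 6),
       PySem.List.slice cs (some 6) (some 9), PySem.List.slice cs (some 9) none, []]
  -- the `while kept and all(...): kept = kept[1:]` loop is exactly dropWhile on the reversal
  let kept := List.dropWhile (fun pc => pc.all (· == '0')) pieces.reverse
  String.ofList (List.flatten kept.reverse)

-- ===== PRECONDITION & SPEC =====
def Spec_cut_kladr (code : String) (out : String) : Prop := out = cut_kladr_alt code
instance (code : String) (out : String) : Decidable (Spec_cut_kladr code out) := by unfold Spec_cut_kladr; infer_instance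

-- ===== CLAIM (what is proved, stated in full; the proofs are below) =====
def Claim_equal_cut_kladr : Prop := ∀ (code : String), Dom_cut_kladr code → Spec_cut_kladr code (cut_kladr code)

-- ===== LEMMAS AND PROOFS =====

-- A's parts list, parametrised by the piece list
def mkParts : List (List Char) → List (List Char × List Char)
  | [] => []
  | p :: rest => (p, (p :: rest).flatten) :: mkParts rest

lemma count_go_singleton (c : Char) : ∀ (fuel : Nat) (l : List Char) (acc : Nat),
    l.length ≤ fuel → PySem.Chars.count.go [c] fuel l acc = acc + l.count c := by
  intro fuel
  induction fuel with
  | zero => intro l acc h; cases l with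
    | nil => simp [PySem.Chars.count.go]
    | cons x t => simp at h
  | succ n ih =>
    intro l acc h
    cases l with
    | nil => simp [PySem.Chars.count.go]
    | cons x t =>
      have ht : t.length ≤ n := by simpa using h
      by_cases hx : c = x
      · subst hx
        simp [PySem.Chars.count.go, List.isPrefixOf, ih _ _ ht]
        omega
      · simp [PySem.Chars.count.go, List.isPrefixOf, hx, ih _ _ ht, Ne.symm hx]

lemma count_singleton_eq (c : Char) (l : List Char) :
    PySem.Chars.count l [c] = l.count c := by
  simp [PySem.Chars.count, count_go_singleton c l.length l 0 (le_refl _)]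

-- the loop condition of A, characterised: the suffix string is NOT all zeros
lemma cond_iff (s : List Char) :
    (PySem.Chars.count s ['0'] ≠ s.length) ↔ ¬ (s.all (· == '0') = true) := by
  rw [count_singleton_eq]
  constructor
  · intro h hall
    exact h (by
      rw [List.count_eq_length]
      intro b hb
      have := List.all_eq_true.mp hall b hb
      exact (beq_iff_eq.mp this).symm)
  · intro h hc
    exact h (by
      rw [List.count_eq_length] at hc
      exact List.all_eq_true.mpr (fun b hb => beq_iff_eq.mpr (hc b hb).symm))

-- all-zero on the flattened suffix = every piece all-zero
lemma all_flatten_pieces (ps : List (List Char)) :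
    ps.flatten.all (· == '0') = ps.all (fun pc => pc.all (· == '0')) :=
  List.all_flatten

-- the key invariant: A's loop over mkParts ps computes B's drop-trailing-zero-pieces join
lemma akLoop_eq (ps : List (List Char)) : ∀ (acc : List Char),
    akLoop (mkParts ps) acc
      = acc ++ (List.dropWhile (fun pc => pc.all (· == '0')) ps.reverse).reverse.flatten := by
  induction ps with
  | nil => intro acc; simp [mkParts, akLoop]
  | cons p rest ih =>
    intro acc
    simp only [mkParts, akLoop]
    by_cases hz : ((p :: rest).flatten.all (· == '0') = true)
    · rw [if_neg (by simpa using (not_not.mpr hz) ∘ (cond_iff _).mp ∘ fun h => h)]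
      · have hall : ∀ pc ∈ (p :: rest).reverse, (fun pc => pc.all (· == '0')) pc = true := by
          intro pc hpc
          have := (List.all_eq_true.mp ((all_flatten_pieces (p :: rest)) ▸ hz)) pc
            (List.mem_reverse.mp hpc)
          simpa using this
        rw [List.dropWhile_eq_nil_iff.mpr (fun x hx => hall x hx)]
        simp
    · rw [if_pos ((cond_iff _).mpr hz)]
      rw [ih]
      have hrev : (p :: rest).reverse = rest.reverse ++ [p] := by simp
      rw [hrev, List.dropWhile_append]
      by_cases hre : (List.dropWhile (fun pc => pc.all (· == '0')) rest.reverse).isEmpty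
      · -- every piece of rest is all-zero, so p is not
        have hrestz : rest.all (fun pc => pc.all (· == '0')) = true := by
          rw [List.isEmpty_iff] at hre
          have := List.dropWhile_eq_nil_iff.mp hre
          exact List.all_eq_true.mpr (fun x hx => by simpa using this x (List.mem_reverse.mpr hx))
        have hp : (p.all (· == '0')) = false := by
          by_contra hb
          apply hz
          rw [all_flatten_pieces]
          simp only [List.all_cons, hrestz, Bool.and_true]
          exact Bool.of_not_eq_false hb
        rw [if_pos hre, List.isEmpty_iff.mp hre]
        simp [List.dropWhile, hp]
      · rw [if_neg hre]
        simp

lemma mkParts_five (r1 r2 c p other : List Char) :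
    [(r1, r1++r2++c++p++other), (r2, r2++c++p++other), (c, c++p++other),
      (p, p++other), (other, other)] = mkParts [r1, r2, c, p, other] := by
  simp [mkParts]

-- A's else-branch slice code[9:len(code)] equals B's code[9:]
lemma slice_to_len (cs : List Char) :
    PySem.List.slice cs (some 9) (some (cs.length : Int)) = PySem.List.slice cs (some 9) none := by
  rw [PySem.List.slice_toNat cs (by omega) (Int.natCast_nonneg _),
      PySem.List.slice_from cs (by omega : (0:Int) ≤ 9)]
  exact List.take_of_length_le (by simp)

-- ===== VERDICT (by name: the statement is the Claim_ definition above) =====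
theorem cut_kladr_spec : Claim_equal_cut_kladr := by
  intro code _
  unfold Spec_cut_kladr cut_kladr cut_kladr_alt
  by_cases h : code.toList.length > 12
  · simp only [h, ite_true]
    rw [mkParts_five, akLoop_eq]
    simp
  · simp only [h, ite_false]
    rw [slice_to_len, mkParts_five, akLoop_eq]
    simp
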